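-- pv_equiv track=rewrite | github.com/gsingh2124/CMSC-201 | Exams/final/jelly_bean_sort.py | jelly_bean_sort
-- ===== SOURCE A (Python) =====
-- def jelly_bean_sort(list_of_colors):
--     colors = {}#dict for colors (makes sense because the dict can count how many of the same things there are)
--     for i in list_of_colors:
--         if i in colors:
--             colors[i] = colors[i] + 1#if the color is already in dict, upp the count
--         else:
--             colors[i] = 1#makes a new thing of dict when a new color is added
--
--     output = list(colors.items())
--
--     for i in range(len(output) - 1):#bubble sort
--         for j in range(len(output) - 1):
--             if output[j] > output[j+1]:
--                 temp = output[j]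
--                 output[j] = output[j+1]
--                 output[j+1] = temp
--
--     return output
-- ===== SOURCE B (Python) =====
-- def jelly_bean_sort(list_of_colors):
--     result = []
--     for color in sorted(list_of_colors):
--         if result and result[-1][0] == color:
--             result[-1] = (color, result[-1][1] + 1)
--         else:
--             result.append((color, 1))
--     return result
-- ===== Notes on version B (the rewrite author's own statement) =====
-- stated objective: faster
-- what changed: Replaces the dict count plus O(k^2) bubble sort of the (color,count) pairs with a single sorted() call followed by one linear grouping pass over the sorted copy.
import Mathlib
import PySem

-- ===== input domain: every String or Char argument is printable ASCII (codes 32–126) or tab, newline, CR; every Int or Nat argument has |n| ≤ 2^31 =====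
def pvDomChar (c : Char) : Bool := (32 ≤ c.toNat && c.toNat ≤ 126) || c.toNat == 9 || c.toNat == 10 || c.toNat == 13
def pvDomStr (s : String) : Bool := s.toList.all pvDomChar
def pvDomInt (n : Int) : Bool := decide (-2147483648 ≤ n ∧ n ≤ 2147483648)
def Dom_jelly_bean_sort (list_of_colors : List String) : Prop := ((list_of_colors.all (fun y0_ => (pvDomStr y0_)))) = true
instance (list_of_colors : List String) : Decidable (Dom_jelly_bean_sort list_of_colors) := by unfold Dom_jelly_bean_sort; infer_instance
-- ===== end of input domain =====

-- B replaces A's dict-count followed by a bubble sort of the pairs with sort-then-group in one pass over the sorted copy.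


-- ===== PORT A =====
-- Python tuple comparison 'output[j] > output[j+1]' on (str, int) pairs (lexicographic)
def pvPairGt (p q : String × Int) : Bool := decide (q.1 < p.1) || (p.1 == q.1 && decide (q.2 < p.2))

-- body of the inner bubble loop: compare output[j] with output[j+1] and swap in place if greater
def pvSwapStep (out : List (String × Int)) (j : Int) : List (String × Int) :=
  if pvPairGt (PySem.List.pyGetD out j ("", 0)) (PySem.List.pyGetD out (j + 1) ("", 0)) then
    let temp := PySem.List.pyGetD out j ("", 0)
    PySem.List.pySetD (PySem.List.pySetD out j (PySem.List.pyGetD out (j + 1) ("", 0))) (j + 1) temp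
  else out

def jelly_bean_sort (list_of_colors : List String) : List (String × Int) :=
  -- for i in list_of_colors: if i in colors: colors[i] = colors[i] + 1 else: colors[i] = 1
  let colors : PySem.Dict String Int :=
    list_of_colors.foldl
      (fun d i => if d.contains i then d.insert i (d.getD i 0 + 1) else d.insert i 1)
      PySem.Dict.empty
  let output := colors.items
  -- for i in range(len(output) - 1): for j in range(len(output) - 1): swap if output[j] > output[j+1]
  (PySem.List.pyRange 0 (PySem.List.len output - 1) 1).foldl
    (fun out _i => (PySem.List.pyRange 0 (PySem.List.len out - 1) 1).foldl pvSwapStep out)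
    output

-- ===== PORT B =====
-- loop body: 'if result and result[-1][0] == color: result[-1] = (color, result[-1][1] + 1) else: result.append((color, 1))'
def pvGroupStep (result : List (String × Int)) (color : String) : List (String × Int) :=
  match result.getLast? with
  | some p => if p.1 == color then result.dropLast ++ [(color, p.2 + 1)] else result ++ [(color, 1)]
  | none => result ++ [(color, 1)]

def jelly_bean_sort_alt (list_of_colors : List String) : List (String × Int) :=
  (PySem.List.sorted list_of_colors (fun x => x) false).foldl pvGroupStep []

-- ===== PRECONDITION & SPEC =====
def Spec_jelly_bean_sort (list_of_colors : List String) (out : List (String × Int)) : Prop := out = jelly_bean_sort_alt list_of_colors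
instance (list_of_colors : List String) (out : List (String × Int)) : Decidable (Spec_jelly_bean_sort list_of_colors out) := by unfold Spec_jelly_bean_sort; infer_instance

-- ===== CLAIM (what is proved, stated in full; the proofs are below) =====
def Claim_equal_jelly_bean_sort : Prop := ∀ (list_of_colors : List String), Dom_jelly_bean_sort list_of_colors → Spec_jelly_bean_sort list_of_colors (jelly_bean_sort list_of_colors)

-- ===== LEMMAS AND PROOFS =====

theorem pvPairGt_eq_false_iff (p q : String × Int) :
    pvPairGt p q = false ↔ (p.1 < q.1 ∨ (p.1 = q.1 ∧ p.2 ≤ q.2)) := by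
  rcases p with ⟨ps, pn⟩; rcases q with ⟨qs, qn⟩
  simp only [pvPairGt, Bool.or_eq_false_iff, Bool.and_eq_false_iff, decide_eq_false_iff_not,
    beq_eq_false_iff_ne, ne_eq, not_lt]
  constructor
  · rintro ⟨h1, h2 | h2⟩
    · rcases lt_or_eq_of_le h1 with h | h
      · exact Or.inl h
      · exact absurd h h2
    · rcases lt_or_eq_of_le h1 with h | h
      · exact Or.inl h
      · exact Or.inr ⟨h, h2⟩
  · rintro (h | ⟨h1, h2⟩)
    · exact ⟨le_of_lt h, Or.inl (by intro e; subst e; exact absurd h (lt_irrefl _))⟩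
    · subst h1; exact ⟨le_refl _, Or.inr h2⟩

theorem pvPairGt_le_refl (p : String × Int) : pvPairGt p p = false := by
  rw [pvPairGt_eq_false_iff]; exact Or.inr ⟨rfl, le_refl _⟩

theorem pvPairGt_le_total (p q : String × Int) (h : pvPairGt p q = true) : pvPairGt q p = false := by
  rw [pvPairGt_eq_false_iff]
  rcases p with ⟨ps, pn⟩; rcases q with ⟨qs, qn⟩
  simp only [pvPairGt, Bool.or_eq_true_iff, Bool.and_eq_true_iff, decide_eq_true_iff, beq_iff_eq] at h
  rcases h with h | ⟨h1, h2⟩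
  · exact Or.inl h
  · exact Or.inr ⟨h1.symm, le_of_lt h2⟩

theorem pvPairGt_le_trans {p q r : String × Int} (h1 : pvPairGt p q = false) (h2 : pvPairGt q r = false) :
    pvPairGt p r = false := by
  rw [pvPairGt_eq_false_iff] at *
  rcases h1 with h1 | ⟨e1, l1⟩ <;> rcases h2 with h2 | ⟨e2, l2⟩
  · exact Or.inl (lt_trans h1 h2)
  · exact Or.inl (e2 ▸ h1)
  · exact Or.inl (e1 ▸ h2)
  · exact Or.inr ⟨e1.trans e2, le_trans l1 l2⟩

-- one structural bubble pass
def pvPass : List (String × Int) → List (String × Int)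
  | [] => []
  | [a] => [a]
  | a :: b :: t => if pvPairGt a b then b :: pvPass (a :: t) else a :: pvPass (b :: t)

theorem pvPass_perm (l : List (String × Int)) : (pvPass l).Perm l := by
  fun_induction pvPass l with
  | case1 => simp
  | case2 => simp
  | case3 a b t h ih => exact (ih.cons b).trans (List.Perm.swap a b t)
  | case4 a b t h ih => exact ih.cons a

theorem pvSwapStep_at (pre : List (String × Int)) (a b : String × Int) (t : List (String × Int)) :
    pvSwapStep (pre ++ a :: b :: t) pre.length =
      if pvPairGt a b then pre ++ b :: a :: t else pre ++ a :: b :: t := by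
  have ha : PySem.List.pyGetD (pre ++ a :: b :: t) (pre.length : Int) ("", 0) = a := by
    simp [PySem.List.pyGetD_natCast, List.getD_eq_getElem?_getD]
  have hb : PySem.List.pyGetD (pre ++ a :: b :: t) ((pre.length : Int) + 1) ("", 0) = b := by
    have : ((pre.length : Int) + 1) = ((pre.length + 1 : Nat) : Int) := by push_cast; ring
    rw [this, PySem.List.pyGetD_natCast]
    simp [List.getD_eq_getElem?_getD]
  simp only [pvSwapStep, ha, hb]
  split
  · have h1 : PySem.List.pySetD (pre ++ a :: b :: t) (pre.length : Int) b = pre ++ b :: b :: t := by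
      rw [PySem.List.pySetD_natCast, List.set_append_right _ _ (le_refl _)]
      simp
    have h2 : ((pre.length : Int) + 1) = ((pre.length + 1 : Nat) : Int) := by push_cast; ring
    rw [h1, h2, PySem.List.pySetD_natCast, List.set_append_right _ _ (by omega)]
    simp
  · rfl

-- the inner index loop IS pvPass, one prefix cell at a time
theorem foldl_swap_eq_pass_aux (suf : List (String × Int)) : ∀ (pre : List (String × Int)),
    (PySem.List.pyRange pre.length (pre.length + suf.length - 1) 1).foldl pvSwapStep (pre ++ suf)
      = pre ++ pvPass suf := by
  fun_induction pvPass suf with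
  | case1 =>
    intro pre
    rw [PySem.List.pyRange_one_eq_nil (by simp)]
    simp
  | case2 a =>
    intro pre
    rw [PySem.List.pyRange_one_eq_nil (by simp)]
    simp
  | case3 a b t h ih =>
    intro pre
    rw [PySem.List.pyRange_one_cons (by simp; omega)]
    rw [List.foldl_cons, pvSwapStep_at, if_pos h]
    have e1 : pre ++ b :: a :: t = (pre ++ [b]) ++ a :: t := by simp
    have e2 : (pre.length : Int) + 1 = ((pre ++ [b]).length : Int) := by simp
    have e3 : (pre.length : Int) + (a :: b :: t).length - 1
        = ((pre ++ [b]).length : Int) + (a :: t).length - 1 := by simp; omega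
    rw [e1, e2, e3, ih]
    simp
  | case4 a b t h ih =>
    intro pre
    rw [PySem.List.pyRange_one_cons (by simp; omega)]
    rw [List.foldl_cons, pvSwapStep_at, if_neg (by simp [h])]
    have e1 : pre ++ a :: b :: t = (pre ++ [a]) ++ b :: t := by simp
    have e2 : (pre.length : Int) + 1 = ((pre ++ [a]).length : Int) := by simp
    have e3 : (pre.length : Int) + (a :: b :: t).length - 1
        = ((pre ++ [a]).length : Int) + (b :: t).length - 1 := by simp; omega
    rw [e1, e2, e3, ih]
    simp

theorem inner_eq_pass (l : List (String × Int)) :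
    (PySem.List.pyRange 0 (PySem.List.len l - 1) 1).foldl pvSwapStep l = pvPass l := by
  simpa [PySem.List.len_eq] using foldl_swap_eq_pass_aux l []

theorem pvPass_last_max (l : List (String × Int)) (hne : l ≠ []) :
    ∃ ys M, pvPass l = ys ++ [M] ∧ ∀ y ∈ ys ++ [M], pvPairGt y M = false := by
  fun_induction pvPass l with
  | case1 => exact absurd rfl hne
  | case2 a =>
    exact ⟨[], a, rfl, by intro y hy; simp at hy; subst hy; exact pvPairGt_le_refl _⟩
  | case3 a b t h ih =>
    obtain ⟨ys, M, he, hm⟩ := ih (by simp)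
    refine ⟨b :: ys, M, by simp [he], ?_⟩
    intro y hy
    rw [List.cons_append, List.mem_cons] at hy
    rcases hy with rfl | hy
    · have ha : a ∈ ys ++ [M] := by rw [← he]; exact (pvPass_perm _).mem_iff.mpr List.mem_cons_self
      exact pvPairGt_le_trans (pvPairGt_le_total a y h) (hm a ha)
    · exact hm y hy
  | case4 a b t h ih =>
    obtain ⟨ys, M, he, hm⟩ := ih (by simp)
    refine ⟨a :: ys, M, by simp [he], ?_⟩
    intro y hy
    rw [List.cons_append, List.mem_cons] at hy
    rcases hy with rfl | hy
    · have hb : b ∈ ys ++ [M] := by rw [← he]; exact (pvPass_perm _).mem_iff.mpr List.mem_cons_self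
      exact pvPairGt_le_trans (Bool.eq_false_iff.mpr (fun hx => by simp [hx] at h)) (hm b hb)
    · exact hm y hy

theorem pvPass_append_max (ys : List (String × Int)) (M : String × Int) :
    (∀ y ∈ ys, pvPairGt y M = false) → pvPass (ys ++ [M]) = pvPass ys ++ [M] := by
  fun_induction pvPass ys with
  | case1 => intro _; simp [pvPass]
  | case2 a =>
    intro h
    have : pvPairGt a M = false := h a (by simp)
    simp [pvPass, this]
  | case3 a b t h ih =>
    intro hm
    show pvPass (a :: b :: (t ++ [M])) = _
    rw [pvPass, if_pos h]
    rw [show a :: (t ++ [M]) = (a :: t) ++ [M] by simp,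
      ih (by intro y hy; apply hm; simp at hy ⊢; tauto)]
    simp
  | case4 a b t h ih =>
    intro hm
    show pvPass (a :: b :: (t ++ [M])) = _
    rw [pvPass, if_neg (by simp [h])]
    rw [show b :: (t ++ [M]) = (b :: t) ++ [M] by simp,
      ih (by intro y hy; apply hm; simp at hy ⊢; tauto)]
    simp

theorem pvPass_iterate_perm (n : Nat) (l : List (String × Int)) : (pvPass^[n] l).Perm l := by
  induction n generalizing l with
  | zero => simp
  | succ n ih =>
    rw [Function.iterate_succ_apply]
    exact (ih (pvPass l)).trans (pvPass_perm l)

theorem pvPass_iterate_append_max (n : Nat) (ys : List (String × Int)) (M : String × Int)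
    (h : ∀ y ∈ ys, pvPairGt y M = false) :
    pvPass^[n] (ys ++ [M]) = pvPass^[n] ys ++ [M] := by
  induction n generalizing ys with
  | zero => simp
  | succ n ih =>
    rw [Function.iterate_succ_apply, Function.iterate_succ_apply, pvPass_append_max ys M h]
    exact ih (pvPass ys) (fun y hy => h y ((pvPass_perm ys).mem_iff.mp hy))

theorem bubble_sorted (n : Nat) (l : List (String × Int)) (h : l.length ≤ n + 1) :
    (pvPass^[n] l).Pairwise (fun p q => pvPairGt p q = false) := by
  induction n generalizing l with
  | zero =>
    match l, h with
    | [], _ => simp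
    | [a], _ => simp
  | succ n ih =>
    rcases l with _ | ⟨a, t⟩
    · rw [Function.iterate_fixed (by simp [pvPass] : pvPass [] = [])]; simp
    · rw [Function.iterate_succ_apply]
      obtain ⟨ys, M, he, hm⟩ := pvPass_last_max (a :: t) (by simp)
      rw [he, pvPass_iterate_append_max n ys M (fun y hy => hm y (by simp [hy]))]
      have hlen : ys.length ≤ n + 1 := by
        have := (pvPass_perm (a :: t)).length_eq
        rw [he] at this; simp at this h; omega
      rw [List.pairwise_append]
      refine ⟨ih ys hlen, by simp, ?_⟩
      intro y hy m hm'
      simp at hm'; subst hm'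
      exact hm y (by simp [(pvPass_iterate_perm n ys).mem_iff.mp hy])

-- a loop ignoring its index is iteration
theorem foldl_const_eq_iterate {α β : Type} (f : α → α) (l : List β) (x : α) :
    l.foldl (fun a _ => f a) x = f^[l.length] x := by
  induction l generalizing x with
  | nil => rfl
  | cons b t ih => simp [List.foldl_cons, ih, Function.iterate_succ_apply]

-- A's counting loop is Counter(xs)
theorem count_loop_eq_counter (xs : List String) :
    xs.foldl (fun d i => if d.contains i then d.insert i (d.getD i 0 + 1) else d.insert i 1)
      PySem.Dict.empty = PySem.Dict.counter xs := by
  rw [← PySem.Dict.foldl_insert_getD_add_one_eq_counter]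
  apply PySem.List.foldl_congr_mem
  intro acc x _
  by_cases h : acc.contains x
  · simp [h]
  · simp only [Bool.not_eq_true] at h
    simp [h, PySem.Dict.getD_of_not_contains _ _ h]

-- B's fold as run-length encoding
def pvRle (c : String) (n : Int) : List String → List (String × Int)
  | [] => [(c, n)]
  | x :: t => if x = c then pvRle c (n + 1) t else (c, n) :: pvRle x 1 t

theorem foldB_eq_rle (l : List String) : ∀ (res : List (String × Int)) (c : String) (n : Int),
    l.foldl pvGroupStep (res ++ [(c, n)]) = res ++ pvRle c n l := by
  induction l with
  | nil => intro res c n; simp [pvRle]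
  | cons x t ih =>
    intro res c n
    rw [List.foldl_cons]
    have hg : pvGroupStep (res ++ [(c, n)]) x =
        if x = c then res ++ [(c, n + 1)] else (res ++ [(c, n)]) ++ [(x, 1)] := by
      simp only [pvGroupStep, List.getLast?_concat]
      by_cases hx : x = c
      · subst hx; simp
      · rw [if_neg (by simpa using Ne.symm hx), if_neg hx]
    rw [hg]
    by_cases hx : x = c
    · subst hx; rw [if_pos rfl, ih res _ (n + 1)]
      simp [pvRle]
    · rw [if_neg hx, ih (res ++ [(c, n)]) x 1]
      simp [pvRle, hx]

theorem rle_sorted_eq (l : List String) : ∀ (c : String) (n : Int),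
    (∀ x ∈ l, c ≤ x) → l.Pairwise (· ≤ ·) →
    pvRle c n l = (c, n + (l.count c : Int)) ::
      ((PySem.Set.ofList l).filter (fun k => !(k == c))).map (fun k => (k, (l.count k : Int))) := by
  induction l with
  | nil => intro c n _ _; simp [pvRle, PySem.Set.ofList_nil]
  | cons x t ih =>
    intro c n hle hs
    rw [List.pairwise_cons] at hs
    by_cases hx : x = c
    · subst hx
      rw [pvRle, if_pos rfl, ih x (n + 1) hs.1 hs.2]
      congr 1
      · rw [List.count_cons_self]; push_cast; ring_nf
      rw [PySem.Set.ofList_cons]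
      simp only [PySem.Set.discard, List.filter_cons]
      rw [if_neg (by simp), List.filter_filter]
      have hff : ∀ p : String, (!(p == x) && !(p == x)) = !(p == x) := by intro p; cases (p == x) <;> rfl
      simp only [hff]
      apply List.map_congr_left
      intro k hk
      have hkx : ¬ (k = x) := by
        have := List.of_mem_filter hk; simpa using this
      rw [List.count_cons_of_ne (Ne.symm hkx)]
    · have hcx : c < x := lt_of_le_of_ne (hle x List.mem_cons_self) (Ne.symm hx)
      have hct : ∀ y ∈ x :: t, c < y := by
        intro y hy; rcases List.mem_cons.mp hy with rfl | hy
        · exact hcx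
        · exact lt_of_lt_of_le hcx (hs.1 y hy)
      rw [pvRle, if_neg hx, ih x 1 hs.1 hs.2]
      have hc0 : (x :: t).count c = 0 := by
        rw [List.count_eq_zero]
        intro hc; exact absurd rfl (ne_of_gt (hct c hc))
      rw [PySem.Set.ofList_cons]
      simp only [PySem.Set.discard, List.filter_cons]
      rw [if_pos (by simp [hx])]
      congr 1
      · rw [hc0]; push_cast; ring_nf
      simp only [List.map_cons]
      congr 1
      · rw [List.count_cons_self]; push_cast; ring_nf
      have hdf : List.filter (fun k => !(k == c)) (List.filter (fun k => !(k == x)) (PySem.Set.ofList t))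
          = List.filter (fun k => !(k == x)) (PySem.Set.ofList t) := by
        apply List.filter_eq_self.mpr
        intro a ha
        have hat : a ∈ t := by
          have := List.mem_filter.mp ha
          simpa [PySem.Set.mem_ofList] using this.1
        simpa using ne_of_gt (hct a (List.mem_cons_of_mem x hat))
      rw [hdf]
      apply List.map_congr_left
      intro k hk
      have hkx : ¬ (k = x) := by have := List.of_mem_filter hk; simpa using this
      rw [List.count_cons_of_ne (Ne.symm hkx)]

theorem alt_eq_canon (xs : List String) :
    jelly_bean_sort_alt xs =
      (PySem.Set.ofList (PySem.List.sorted xs (fun x => x) false)).map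
        (fun k => (k, ((PySem.List.sorted xs (fun x => x) false).count k : Int))) := by
  unfold jelly_bean_sort_alt
  have hp : (PySem.List.sorted xs (fun x => x) false).Pairwise (· ≤ ·) :=
    PySem.List.sorted_pairwise xs (fun x => x)
  generalize hs : PySem.List.sorted xs (fun x => x) false = s at *
  rcases s with _ | ⟨c, t⟩
  · simp [PySem.Set.ofList_nil]
  · rw [List.pairwise_cons] at hp
    rw [List.foldl_cons]
    have h0 : pvGroupStep [] c = [] ++ [(c, 1)] := by simp [pvGroupStep]
    rw [h0, foldB_eq_rle t [] c 1, rle_sorted_eq t c 1 hp.1 hp.2]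
    rw [PySem.Set.ofList_cons]
    simp only [PySem.Set.discard, List.nil_append, List.map_cons]
    congr 1
    · rw [List.count_cons_self]; push_cast; ring_nf
    apply List.map_congr_left
    intro k hk
    have hkc : ¬ (k = c) := by have := List.of_mem_filter hk; simpa using this
    rw [List.count_cons_of_ne (Ne.symm hkc)]

theorem ofList_sublist (l : List String) : (PySem.Set.ofList l).Sublist l := by
  induction l with
  | nil => simp [PySem.Set.ofList_nil]
  | cons x t ih =>
    rw [PySem.Set.ofList_cons]
    exact List.Sublist.cons₂ x ((List.filter_sublist).trans ih)

theorem main_eq (xs : List String) : jelly_bean_sort xs = jelly_bean_sort_alt xs := by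
  -- A's result: (len-1)-fold bubble pass over Counter(xs).items
  have hA0 : jelly_bean_sort xs =
      pvPass^[((PySem.Dict.counter xs).items).length - 1] ((PySem.Dict.counter xs).items) := by
    show (PySem.List.pyRange 0 (PySem.List.len _ - 1) 1).foldl _ _ = _
    rw [count_loop_eq_counter]
    have hbody : (fun (out : List (String × Int)) (_i : Int) =>
        (PySem.List.pyRange 0 (PySem.List.len out - 1) 1).foldl pvSwapStep out)
        = fun out (_i : Int) => pvPass out := by
      funext out i; exact inner_eq_pass out
    rw [hbody, foldl_const_eq_iterate]
    congr 1
    rw [PySem.List.length_pyRange_one, PySem.List.len_eq]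
    omega
  set C : List (String × Int) :=
    (PySem.Set.ofList xs).map (fun k => (k, (List.count k xs : Int))) with hC
  have hitems : (PySem.Dict.counter xs).items = C := PySem.Dict.items_counter xs
  have hA1 : jelly_bean_sort xs = pvPass^[C.length - 1] C := by rw [hA0, hitems]
  -- C's keys are distinct
  have hCkeys : C.map Prod.fst = PySem.Set.ofList xs := by
    rw [hC, List.map_map]
    rw [show (Prod.fst ∘ fun k : String => (k, (List.count k xs : Int))) = id from rfl, List.map_id]
  have hCnodup : (C.map Prod.fst).Nodup := by
    rw [hCkeys]; exact PySem.Set.nodup_ofList xs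
  -- A's result: Perm C and strictly key-sorted
  have hAperm : (jelly_bean_sort xs).Perm C := by rw [hA1]; exact pvPass_iterate_perm _ _
  have hAle : (jelly_bean_sort xs).Pairwise (fun p q => pvPairGt p q = false) := by
    rw [hA1]; exact bubble_sorted _ _ (by omega)
  have hAnodup : ((jelly_bean_sort xs).map Prod.fst).Nodup := ((hAperm.map Prod.fst).nodup_iff).mpr hCnodup
  have hAne : (jelly_bean_sort xs).Pairwise (fun p q => p.1 ≠ q.1) := List.pairwise_map.mp hAnodup
  have hAlt : (jelly_bean_sort xs).Pairwise (fun p q => p.1 < q.1) := by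
    refine (hAle.and hAne).imp ?_
    rintro a b ⟨h1, h2⟩
    rcases (pvPairGt_eq_false_iff a b).mp h1 with hlt | ⟨he, _⟩
    · exact hlt
    · exact absurd he h2
  have hAeq : PySem.List.sorted C (fun p => p.1) = jelly_bean_sort xs :=
    PySem.List.sorted_eq_of_perm_of_pairwise_lt C _ (fun p => p.1) hAperm hAlt
  -- B's result: Perm C and strictly key-sorted
  set s : List String := PySem.List.sorted xs (fun x => x) false with hsdef
  have hsperm : s.Perm xs := PySem.List.sorted_perm xs (fun x => x) false
  have hB0 : jelly_bean_sort_alt xs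
      = (PySem.Set.ofList s).map (fun k => (k, (List.count k s : Int))) := alt_eq_canon xs
  have hB1 : jelly_bean_sort_alt xs
      = (PySem.Set.ofList s).map (fun k => (k, (List.count k xs : Int))) := by
    rw [hB0]
    apply List.map_congr_left
    intro k _
    rw [hsperm.count_eq k]
  have hsetperm : (PySem.Set.ofList s).Perm (PySem.Set.ofList xs) := by
    rw [List.perm_ext_iff_of_nodup (PySem.Set.nodup_ofList s) (PySem.Set.nodup_ofList xs)]
    intro a
    rw [PySem.Set.mem_ofList, PySem.Set.mem_ofList, hsperm.mem_iff]
  have hBperm : (jelly_bean_sort_alt xs).Perm C := by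
    rw [hB1, hC]
    exact hsetperm.map _
  have hskeyle : (PySem.Set.ofList s).Pairwise (· ≤ ·) := by
    have hsle : s.Pairwise (· ≤ ·) := PySem.List.sorted_pairwise xs (fun x => x)
    exact hsle.sublist (ofList_sublist s)
  have hskeylt : (PySem.Set.ofList s).Pairwise (· < ·) := by
    refine (hskeyle.and (PySem.Set.nodup_ofList s)).imp ?_
    rintro a b ⟨h1, h2⟩
    exact lt_of_le_of_ne h1 h2
  have hBlt : (jelly_bean_sort_alt xs).Pairwise (fun p q => p.1 < q.1) := by
    rw [hB1]
    exact List.pairwise_map.mpr hskeylt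
  have hBeq : PySem.List.sorted C (fun p => p.1) = jelly_bean_sort_alt xs :=
    PySem.List.sorted_eq_of_perm_of_pairwise_lt C _ (fun p => p.1) hBperm hBlt
  rw [← hAeq, hBeq]

-- ===== VERDICT (by name: the statement is the Claim_ definition above) =====
theorem jelly_bean_sort_spec : Claim_equal_jelly_bean_sort := by
  intro xs _
  unfold Spec_jelly_bean_sort
  exact main_eq xs
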